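-- pv_equiv track=rewrite | github.com/acatejr/hackerrank | collections-counter.py | calulate_order_total
-- ===== SOURCE A (Python) =====
-- from collections import Counter
--
-- def calulate_order_total(num_shoes, shoe_sizes, orders):
--     total = 0
--     items = Counter(shoe_sizes).items()
--     inventory = {}
--     for item in items:
--         inventory[item[0]] = item[1]
--
--     for order in orders:
--         size = order[0]
--         price = order[1]
--
--         if size in inventory.keys():
--             if price and inventory[size] != 0:
--                 total += price
--                 inventory[size] -= 1
--
--     return total
-- ===== SOURCE B (Python) =====
-- def calulate_order_total(num_shoes, shoe_sizes, orders):
--     counts = {}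
--     for s in shoe_sizes:
--         counts[s] = counts.get(s, 0) + 1
--     by_size = {}
--     for order in orders:
--         size = order[0]
--         price = order[1]
--         if price:
--             by_size.setdefault(size, []).append(price)
--     total = 0
--     for size, k in counts.items():
--         total += sum(by_size.get(size, [])[:k])
--     return total
-- ===== Notes on version B (the rewrite author's own statement) =====
-- stated objective: alternative
-- what changed: Instead of decrementing a mutable inventory while scanning orders, B groups the truthy prices per size in one pass and then, for each size's stock count k, sums the first k grouped prices (index-then-take-k); Pre_ excludes orders with an entry shorter than 2, on which both programs raise IndexError.
import Mathlib
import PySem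

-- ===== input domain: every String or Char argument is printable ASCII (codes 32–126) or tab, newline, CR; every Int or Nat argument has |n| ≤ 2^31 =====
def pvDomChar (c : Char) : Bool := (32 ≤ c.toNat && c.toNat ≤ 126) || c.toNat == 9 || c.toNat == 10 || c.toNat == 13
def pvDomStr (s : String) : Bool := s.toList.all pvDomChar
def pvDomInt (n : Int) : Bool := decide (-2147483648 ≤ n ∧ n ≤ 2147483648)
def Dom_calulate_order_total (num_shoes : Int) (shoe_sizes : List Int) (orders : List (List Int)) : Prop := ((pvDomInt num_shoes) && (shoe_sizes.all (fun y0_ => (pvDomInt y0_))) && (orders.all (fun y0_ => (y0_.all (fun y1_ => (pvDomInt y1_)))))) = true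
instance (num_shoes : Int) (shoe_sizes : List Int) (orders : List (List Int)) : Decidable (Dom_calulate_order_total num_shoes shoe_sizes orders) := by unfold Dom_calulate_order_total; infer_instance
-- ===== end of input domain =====

-- B replaces A's in-loop inventory decrement by a group-prices-per-size pass followed by a take-k
-- sum per stocked size (alternative decomposition, same asymptotic cost).


-- ===== PORT A =====
-- one step of A's order loop: state (total, inventory)
def pvStepA (acc : Int × PySem.Dict Int Int) (order : List Int) : Int × PySem.Dict Int Int :=
  let size := PySem.List.pyGetD order 0 0      -- order[0]  (in range under Pre_)
  let price := PySem.List.pyGetD order 1 0     -- order[1]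
  if acc.2.contains size then
    if price ≠ 0 ∧ acc.2.getD size 0 ≠ 0 then
      (acc.1 + price, acc.2.insert size (acc.2.getD size 0 - 1))
    else acc
  else acc

def calulate_order_total (num_shoes : Int) (shoe_sizes : List Int) (orders : List (List Int)) : Int :=
  let items := (PySem.Dict.counter shoe_sizes).items
  let inventory := items.foldl (fun d it => d.insert it.1 it.2) PySem.Dict.empty
  (orders.foldl pvStepA ((0 : Int), inventory)).1

-- ===== PORT B =====
def calulate_order_total_alt (num_shoes : Int) (shoe_sizes : List Int) (orders : List (List Int)) : Int :=
  let counts := shoe_sizes.foldl (fun d s => d.insert s (d.getD s 0 + 1)) PySem.Dict.empty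
  let by_size := orders.foldl
    (fun (d : PySem.Dict Int (List Int)) order =>
      let size := PySem.List.pyGetD order 0 0
      let price := PySem.List.pyGetD order 1 0
      if price ≠ 0 then d.modify size [] (· ++ [price]) else d)
    PySem.Dict.empty
  counts.items.foldl
    (fun total p => total + (PySem.List.slice (by_size.getD p.1 []) none (some p.2)).sum) 0

-- ===== PRECONDITION & SPEC =====
-- Pre_ excludes exactly the inputs where A raises IndexError (an order entry shorter than 2).
def Pre_calulate_order_total (num_shoes : Int) (shoe_sizes : List Int) (orders : List (List Int)) : Prop :=
  ∀ o ∈ orders, 2 ≤ o.length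
instance (num_shoes : Int) (shoe_sizes : List Int) (orders : List (List Int)) : Decidable (Pre_calulate_order_total num_shoes shoe_sizes orders) := by unfold Pre_calulate_order_total; infer_instance

def pvWitness_calulate_order_total : Int × List Int × List (List Int) := (2, [1, 2, 1], [[1, 10], [2, 0], [1, 5], [3, 7]])

def Spec_calulate_order_total (num_shoes : Int) (shoe_sizes : List Int) (orders : List (List Int)) (out : Int) : Prop := out = calulate_order_total_alt num_shoes shoe_sizes orders
instance (num_shoes : Int) (shoe_sizes : List Int) (orders : List (List Int)) (out : Int) : Decidable (Spec_calulate_order_total num_shoes shoe_sizes orders out) := by unfold Spec_calulate_order_total; infer_instance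

-- ===== CLAIM (what is proved, stated in full; the proofs are below) =====
def Claim_equal_calulate_order_total : Prop := ∀ (num_shoes : Int) (shoe_sizes : List Int) (orders : List (List Int)), Dom_calulate_order_total num_shoes shoe_sizes orders → Pre_calulate_order_total num_shoes shoe_sizes orders → Spec_calulate_order_total num_shoes shoe_sizes orders (calulate_order_total num_shoes shoe_sizes orders)

-- ===== LEMMAS AND PROOFS =====

-- the (size, price) pair A and B read from an order
def pvPair (order : List Int) : Int × Int := (PySem.List.pyGetD order 0 0, PySem.List.pyGetD order 1 0)

-- the truthy prices of size s among the pairs, in order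
def pvPrices (s : Int) (ps : List (Int × Int)) : List Int :=
  ((ps.filter (fun p => p.2 ≠ 0)).filter (fun p => p.1 == s)).map (·.2)

lemma pvPrices_nil (s : Int) : pvPrices s [] = [] := rfl

lemma pvPrices_cons (s : Int) (p : Int × Int) (ps : List (Int × Int)) :
    pvPrices s (p :: ps) = if p.2 ≠ 0 ∧ p.1 = s then p.2 :: pvPrices s ps else pvPrices s ps := by
  simp only [pvPrices, List.filter_cons]
  by_cases h2 : p.2 = 0 <;> by_cases h1 : p.1 = s <;>
    simp [h1, h2]

lemma pv_sum_map_update {l : List Int} (hl : l.Nodup) {s : Int} (hs : s ∈ l)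
    (f g : Int → Int) (hfg : ∀ k ∈ l, k ≠ s → f k = g k) :
    (l.map f).sum = (l.map g).sum + (f s - g s) := by
  induction l with
  | nil => cases hs
  | cons a l ih =>
    by_cases has : a = s
    · subst has
      have hnot : a ∉ l := (List.nodup_cons.1 hl).1
      have : l.map f = l.map g := List.map_congr_left (fun k hk => hfg k (List.mem_cons_of_mem _ hk) (fun h => hnot (h ▸ hk)))
      simp [this]; ring
    · have hmem : s ∈ l := (List.mem_cons.1 hs).resolve_left (fun h => has h.symm)
      have ha : f a = g a := hfg a List.mem_cons_self has
      have := ih (List.nodup_cons.1 hl).2 hmem (fun k hk hks => hfg k (List.mem_cons_of_mem _ hk) hks)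
      simp [ha, this]; ring

-- A's loop invariant: the remaining total is the per-size sum of the first (stock) truthy prices.
lemma pvLoopA (ps : List (Int × Int)) :
    ∀ (d : PySem.Dict Int Int) (total : Int), d.keys.Nodup → (∀ k ∈ d.keys, 0 ≤ d.getD k 0) →
    (ps.foldl (fun acc p =>
        if acc.2.contains p.1 then
          if p.2 ≠ 0 ∧ acc.2.getD p.1 0 ≠ 0 then
            (acc.1 + p.2, acc.2.insert p.1 (acc.2.getD p.1 0 - 1))
          else acc
        else acc) (total, d)).1
      = total + (d.keys.map (fun k => ((pvPrices k ps).take (d.getD k 0).toNat).sum)).sum := by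
  induction ps with
  | nil =>
    intro d total _ _
    simp [pvPrices_nil]
  | cons p ps ih =>
    intro d total hnd hpos
    by_cases hc : d.contains p.1
    · have hmem : p.1 ∈ d.keys := (PySem.Dict.contains_iff_mem_keys _ _).1 hc
      by_cases h2 : p.2 = 0
      · -- falsy price: state unchanged, p filtered out everywhere
        simp only [List.foldl_cons, hc, if_true, h2]
        rw [if_neg (by simp [h2]), ih d total hnd hpos]
        congr 1
        apply congrArg List.sum
        apply List.map_congr_left
        intro k _
        rw [pvPrices_cons]
        simp [h2]
      · by_cases h0 : d.getD p.1 0 = 0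
        · -- stock exhausted: state unchanged; at p.1 both takes are empty
          simp only [List.foldl_cons, hc, if_true]
          rw [if_neg (by simp [h0]), ih d total hnd hpos]
          congr 1
          apply congrArg List.sum
          apply List.map_congr_left
          intro k _
          rw [pvPrices_cons]
          by_cases hk : p.1 = k
          · subst hk; simp [h0]
          · simp [hk]
        · -- sell one: total grows by the price, stock at p.1 drops by one
          have hge : 1 ≤ d.getD p.1 0 := lt_of_le_of_ne (hpos _ hmem) (Ne.symm h0)
          simp only [List.foldl_cons, hc, if_true]
          rw [if_pos ⟨h2, h0⟩]
          set d' := d.insert p.1 (d.getD p.1 0 - 1) with hd'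
          have hkeys : d'.keys = d.keys := PySem.Dict.keys_insert_of_contains _ _ hc
          have hget : ∀ k, d'.getD k 0 = if k = p.1 then d.getD p.1 0 - 1 else d.getD k 0 := by
            intro k; rw [hd', PySem.Dict.getD_insert]
          have hnd' : d'.keys.Nodup := hkeys ▸ hnd
          have hpos' : ∀ k ∈ d'.keys, 0 ≤ d'.getD k 0 := by
            intro k hk
            rw [hget k]
            split_ifs with h
            · omega
            · exact hpos k (hkeys ▸ hk)
          rw [ih d' (total + p.2) hnd' hpos', hkeys]
          have hupd := pv_sum_map_update hnd hmem
            (fun k => ((pvPrices k (p :: ps)).take (d.getD k 0).toNat).sum)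
            (fun k => ((pvPrices k ps).take (d'.getD k 0).toNat).sum)
            (by
              intro k _ hks
              simp only [pvPrices_cons, hget k, if_neg hks]
              rw [if_neg (by simp [Ne.symm hks])])
          simp only [] at hupd
          have hdiff : ((pvPrices p.1 (p :: ps)).take (d.getD p.1 0).toNat).sum
              - ((pvPrices p.1 ps).take (d'.getD p.1 0).toNat).sum = p.2 := by
            rw [pvPrices_cons, if_pos ⟨h2, rfl⟩, hget p.1, if_pos rfl]
            have h1 : (d.getD p.1 0).toNat = ((d.getD p.1 0 - 1).toNat) + 1 := by omega
            rw [h1, List.take_succ_cons]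
            simp
          omega
    · -- size not stocked: order skipped, no key equals p.1
      have hc' : d.contains p.1 = false := by simpa using hc
      simp only [List.foldl_cons, hc', Bool.false_eq_true, if_false]
      rw [ih d total hnd hpos]
      congr 1
      apply congrArg List.sum
      apply List.map_congr_left
      intro k hk
      rw [pvPrices_cons]
      have : p.1 ≠ k := by
        intro h
        exact hc ((PySem.Dict.contains_iff_mem_keys _ _).2 (h ▸ hk))
      simp [this]

-- A's inventory-building loop reproduces the counter dict itself
lemma pvInventory_eq (shoe_sizes : List Int) :
    (PySem.Dict.counter shoe_sizes).items.foldl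
      (fun d it => d.insert it.1 it.2) (PySem.Dict.empty : PySem.Dict Int Int)
      = PySem.Dict.counter shoe_sizes := by
  apply PySem.Dict.ext
  rw [PySem.Dict.items_foldl_insert_fresh _ _ _ _ (by intro a _; simp) ?nod]
  · simp [PySem.Dict.empty]
  case nod =>
    have := PySem.Dict.nodup_keys_counter (xs := shoe_sizes)
    simpa [PySem.Dict.keys] using this

-- B's grouping loop, expressed through pvPrices
lemma pvBySize_eq (pairs : List (Int × Int)) (s : Int) :
    ((pairs.foldl (fun (d : PySem.Dict Int (List Int)) p =>
        if p.2 ≠ 0 then d.modify p.1 [] (· ++ [p.2]) else d) PySem.Dict.empty).getD s [])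
      = pvPrices s pairs := by
  have hfold : (pairs.foldl (fun (d : PySem.Dict Int (List Int)) p =>
        if p.2 ≠ 0 then d.modify p.1 [] (· ++ [p.2]) else d) PySem.Dict.empty)
      = (pairs.filter (fun p => p.2 ≠ 0)).foldl
          (fun d p => d.modify p.1 [] (· ++ [p.2])) PySem.Dict.empty := by
    rw [List.foldl_filter]
    simp
  rw [hfold, PySem.Dict.getD_foldl_modify_append]
  simp [pvPrices]

-- counter facts in the form both ports reach
lemma pvCounts_eq (shoe_sizes : List Int) :
    shoe_sizes.foldl (fun d s => d.insert s (d.getD s 0 + 1)) (PySem.Dict.empty : PySem.Dict Int Int)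
      = PySem.Dict.counter shoe_sizes :=
  PySem.Dict.foldl_insert_getD_add_one_eq_counter shoe_sizes

-- ===== VERDICT (by name: the statement is the Claim_ definition above) =====
theorem calulate_order_total_spec : Claim_equal_calulate_order_total := by
  unfold Claim_equal_calulate_order_total
  intro num_shoes shoe_sizes orders _ _
  unfold Spec_calulate_order_total calulate_order_total calulate_order_total_alt
  simp only [pvCounts_eq, pvInventory_eq]
  set C := PySem.Dict.counter shoe_sizes with hC
  -- A's side: fold over orders = fold over pairs
  have hA : (orders.foldl pvStepA ((0 : Int), C)).1
      = ((orders.map pvPair).foldl (fun acc p =>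
          if acc.2.contains p.1 then
            if p.2 ≠ 0 ∧ acc.2.getD p.1 0 ≠ 0 then
              (acc.1 + p.2, acc.2.insert p.1 (acc.2.getD p.1 0 - 1))
            else acc
          else acc) ((0 : Int), C)).1 := by
    rw [List.foldl_map]
    rfl
  rw [hA, pvLoopA (orders.map pvPair) C 0
    (by rw [hC, PySem.Dict.keys_counter]; exact PySem.Set.nodup_ofList _)
    (by intro k _; rw [hC, PySem.Dict.getD_counter]; positivity)]
  -- B's side
  have hB : ∀ (init : Int), (C.items.foldl
      (fun total p => total + (PySem.List.slice
        ((orders.foldl (fun (d : PySem.Dict Int (List Int)) order =>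
          let size := PySem.List.pyGetD order 0 0
          let price := PySem.List.pyGetD order 1 0
          if price ≠ 0 then d.modify size [] (· ++ [price]) else d) PySem.Dict.empty).getD p.1 [])
        none (some p.2)).sum) init)
      = init + (C.items.map (fun p =>
          (PySem.List.slice (pvPrices p.1 (orders.map pvPair)) none (some p.2)).sum)).sum := by
    intro init
    have hby : (orders.foldl (fun (d : PySem.Dict Int (List Int)) order =>
          let size := PySem.List.pyGetD order 0 0
          let price := PySem.List.pyGetD order 1 0
          if price ≠ 0 then d.modify size [] (· ++ [price]) else d) PySem.Dict.empty)
        = ((orders.map pvPair).foldl (fun (d : PySem.Dict Int (List Int)) p =>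
            if p.2 ≠ 0 then d.modify p.1 [] (· ++ [p.2]) else d) PySem.Dict.empty) := by
      rw [List.foldl_map]
      rfl
    simp only [hby, pvBySize_eq]
    exact PySem.List.foldl_add _ _ init
  rw [hB]
  rw [hC, PySem.Dict.items_counter, PySem.Dict.keys_counter]
  simp only [List.map_map, zero_add]
  apply congrArg List.sum
  apply List.map_congr_left
  intro k _
  simp only [Function.comp_apply, PySem.Dict.getD_counter]
  rw [PySem.List.slice_to _ (by positivity)]
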